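-- pv_equiv track=rewrite | github.com/Shantanugupta1118/200-Days-Code-Challenge | Day 4/INFYTQ - HackWithInfy Round 2021 - Bag coins.py | solve
-- ===== SOURCE A (Python) =====
-- def solve(bag_coins, n):
--     count=[]
--     k=0
--     for j in bag_coins:
--         minn=min(bag_coins[k:len(bag_coins)])
--         total=0
--         for ele in bag_coins[k:len(bag_coins)]:
--             if(ele>=minn):
--                 total+=minn
--         count.append(total)
--         k+=1
--     return max(count)
-- ===== SOURCE B (Python) =====
-- def solve(bag_coins, n):
--     best = None
--     m = None
--     length = 0
--     for x in reversed(bag_coins):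
--         m = x if m is None else min(m, x)
--         length += 1
--         t = m * length
--         if best is None or t > best:
--             best = t
--     return best
-- ===== Notes on version B (the rewrite author's own statement) =====
-- stated objective: faster
-- what changed: Replaced the nested loop over suffix slices (min + rescan per start index) with a single backward pass maintaining the running suffix minimum, suffix length and best min*length product.
-- outside the precondition, e.g. on solve([], 0): A raises ValueError, B returns None
import Mathlib
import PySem

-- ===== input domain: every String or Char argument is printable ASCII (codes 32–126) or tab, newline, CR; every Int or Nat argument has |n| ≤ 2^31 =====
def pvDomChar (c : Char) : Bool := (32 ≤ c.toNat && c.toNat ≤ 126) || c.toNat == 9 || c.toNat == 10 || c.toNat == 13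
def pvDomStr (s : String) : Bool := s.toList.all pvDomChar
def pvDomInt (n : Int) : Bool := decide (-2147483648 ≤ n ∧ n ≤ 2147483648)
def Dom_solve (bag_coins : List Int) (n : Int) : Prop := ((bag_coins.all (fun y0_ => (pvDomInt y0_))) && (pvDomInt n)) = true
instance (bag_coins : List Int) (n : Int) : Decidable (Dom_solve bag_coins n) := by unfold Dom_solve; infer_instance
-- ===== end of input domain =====

-- B replaces A's O(n^2) per-suffix slice+min+rescan with one O(n) backward pass (running min, length, best).
-- A mutates nothing; equivalence is about the return value.

-- ===== PORT A =====
-- the 'for j in bag_coins' loop with counter k and accumulator count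
def solveLoopA (bag : List Int) : List Int → Nat → List Int → List Int
  | [], _, count => count
  | _ :: js, k, count =>
    let suf := PySem.List.slice bag (some (k : Int)) (some (bag.length : Int))
    let minn := (PySem.List.min? suf (fun x => x)).getD 0
    let total := suf.foldl (fun t ele => if minn ≤ ele then t + minn else t) 0
    solveLoopA bag js (k + 1) (count ++ [total])

def solve (bag_coins : List Int) (n : Int) : Int :=
  (PySem.List.max? (solveLoopA bag_coins bag_coins 0 []) (fun x => x)).getD 0

-- ===== PORT B =====
-- loop body of Source B: state (best, m, length)
def stepB (st : Option Int × Option Int × Int) (x : Int) : Option Int × Option Int × Int :=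
  let m : Int := match st.2.1 with | none => x | some mm => min mm x
  let len : Int := st.2.2 + 1
  let t : Int := m * len
  let best : Option Int := match st.1 with | none => some t | some b => if b < t then some t else some b
  (best, some m, len)

def solve_alt (bag_coins : List Int) (n : Int) : Int :=
  ((bag_coins.reverse.foldl stepB (none, none, 0)).1).getD 0

-- ===== PRECONDITION & SPEC =====
-- Pre_ excludes only the empty list, on which A raises ValueError (max of empty sequence).
def Pre_solve (bag_coins : List Int) (n : Int) : Prop := bag_coins ≠ []
instance (bag_coins : List Int) (n : Int) : Decidable (Pre_solve bag_coins n) := by unfold Pre_solve; infer_instance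
def pvWitness_solve : List Int × Int := ([3, 1, 2], 3)

def Spec_solve (bag_coins : List Int) (n : Int) (out : Int) : Prop := out = solve_alt bag_coins n
instance (bag_coins : List Int) (n : Int) (out : Int) : Decidable (Spec_solve bag_coins n out) := by unfold Spec_solve; infer_instance

-- ===== CLAIM (what is proved, stated in full; the proofs are below) =====
def Claim_equal_solve : Prop := ∀ (bag_coins : List Int) (n : Int), Dom_solve bag_coins n → Pre_solve bag_coins n → Spec_solve bag_coins n (solve bag_coins n)

-- ===== LEMMAS AND PROOFS =====

-- reference: the list of per-suffix totals min(suffix)*len(suffix)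
def totals : List Int → List Int
  | [] => []
  | x :: l => (l.foldl min x) * ((l.length : Int) + 1) :: totals l

theorem foldl_min_comm (t : List Int) : ∀ a b : Int, t.foldl min (min a b) = min (t.foldl min a) b := by
  induction t with
  | nil => intro a b; rfl
  | cons c t ih =>
    intro a b
    simp only [List.foldl_cons]
    rw [show min (min a b) c = min (min a c) b by
      simp [min_assoc, min_comm b c]]
    exact ih (min a c) b

theorem foldl_max_comm (t : List Int) : ∀ a b : Int, t.foldl max (max a b) = max (t.foldl max a) b := by
  induction t with
  | nil => intro a b; rfl
  | cons c t ih =>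
    intro a b
    simp only [List.foldl_cons]
    rw [show max (max a b) c = max (max a c) b by
      simp [max_assoc, max_comm b c]]
    exact ih (max a c) b

-- the inner rescan loop adds minn once per element when every element is ≥ minn
theorem inner_total (m : Int) : ∀ (l : List Int) (t0 : Int), (∀ x ∈ l, m ≤ x) →
    l.foldl (fun t ele => if m ≤ ele then t + m else t) t0 = t0 + m * l.length := by
  intro l
  induction l with
  | nil => intro t0 _; simp
  | cons x l ih =>
    intro t0 h
    simp only [List.foldl_cons, if_pos (h x (by simp))]
    rw [ih (t0 + m) (fun y hy => h y (by simp [hy]))]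
    push_cast [List.length_cons]; ring

theorem minOf_cons (x : Int) (l : List Int) :
    PySem.List.min? (x :: l) (fun y => y) = some (l.foldl min x) :=
  PySem.List.min?_id_cons ..

theorem loopA_eq (bag : List Int) : ∀ (l : List Int) (k : Nat) (count : List Int),
    bag.drop k = l → solveLoopA bag l k count = count ++ totals l := by
  intro l
  induction l with
  | nil => intro k count _; simp [solveLoopA, totals]
  | cons x l ih =>
    intro k count hdrop
    have hsuf : PySem.List.slice bag (some (k : Int)) (some (bag.length : Int)) = x :: l := by
      rw [PySem.List.slice_natCast, hdrop]
      have hlen : (x :: l).length = bag.length - k := by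
        rw [← hdrop]; simp
      exact List.take_of_length_le (by omega)
    simp only [solveLoopA, hsuf, minOf_cons, Option.getD_some]
    rw [inner_total (l.foldl min x) (x :: l) 0 ?_]
    · rw [ih (k + 1) _ (by rw [← List.drop_drop, hdrop]; rfl)]
      simp [totals]
    · intro y hy
      have := PySem.List.min?_isMin (minOf_cons x l)
      exact this y hy

-- running max as an Option, matching Source B's 'best'
def maxOf : List Int → Option Int
  | [] => none
  | x :: l => some (l.foldl max x)

theorem solve_eq_totals (bag : List Int) (n : Int) :
    solve bag n = (PySem.List.max? (totals bag) (fun x => x)).getD 0 := by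
  unfold solve
  rw [loopA_eq bag bag 0 [] (by simp)]
  rfl

theorem max?_eq_maxOf (l : List Int) : PySem.List.max? l (fun x => x) = maxOf l := by
  cases l with
  | nil => rfl
  | cons x t => exact PySem.List.max?_id_cons ..

-- invariant of B's backward pass (as a foldr over the original list)
theorem foldrB (l : List Int) :
    l.foldr (fun x st => stepB st x) (none, none, 0) =
      (maxOf (totals l),
       (match l with | [] => none | x :: t => some (t.foldl min x)),
       (l.length : Int)) := by
  induction l with
  | nil => rfl
  | cons x l ih =>
    simp only [List.foldr_cons, ih]
    cases l with
    | nil => simp [stepB, totals, maxOf]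
    | cons y t =>
      simp only [stepB, totals, maxOf]
      have hmin : min (List.foldl min y t) x = List.foldl min x (y :: t) := by
        rw [← foldl_min_comm, min_comm y x, List.foldl_cons]
      have hlen : ((y :: t).length : Int) + 1 = ((x :: y :: t).length : Int) := by
        push_cast [List.length_cons]; ring
      refine Prod.ext ?_ (Prod.ext (by dsimp only; rw [hmin]) (by dsimp only; exact hlen))
      dsimp only
      simp only [hmin, hlen]
      set h0 := (t.foldl min y) * ((t.length : Int) + 1) with hh0
      set b := (totals t).foldl max h0 with hb
      set tt := ((y :: t).foldl min x) * (((x :: y :: t).length : Int)) with htt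
      have hif : (if b < tt then some tt else some b) = some (max b tt) := by
        by_cases h : b < tt
        · rw [if_pos h, max_eq_right h.le]
        · rw [if_neg h, max_eq_left (not_lt.mp h)]
      rw [hif, List.foldl_cons, max_comm tt h0, foldl_max_comm, ← hb, max_comm]

theorem solve_alt_eq_totals (bag : List Int) (n : Int) :
    solve_alt bag n = (maxOf (totals bag)).getD 0 := by
  unfold solve_alt
  rw [List.foldl_reverse, foldrB]

theorem solve_eq_solve_alt (bag : List Int) (n : Int) : solve bag n = solve_alt bag n := by
  rw [solve_eq_totals, solve_alt_eq_totals, max?_eq_maxOf]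

-- ===== VERDICT (by name: the statement is the Claim_ definition above) =====
theorem solve_spec : Claim_equal_solve := by
  intro bag n _ _
  unfold Spec_solve
  exact solve_eq_solve_alt bag n
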